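-- pv_equiv track=rewrite | github.com/mfathi91/advent-of-code | 2021/day12/part2/main.py | filter_multiple_small_cave_paths
-- ===== SOURCE A (Python) =====
-- from typing import List
--
-- def is_small_cave(cave: str):
--     for ch in cave:
--         if ch.isupper():
--             return False
--     return True
--
-- def filter_multiple_small_cave_paths(paths: List[List[str]]):
--     filtered_paths = []
--     for path in paths:
--         small_cave_count_map = {}
--         for cave in path:
--             if is_small_cave(cave):
--                 small_cave_count_map[cave] = small_cave_count_map.get(cave, 0) + 1
--
--         has_multiple_small_caves = len([sc for sc in small_cave_count_map.values() if sc > 1]) > 1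
--         if not has_multiple_small_caves:
--             filtered_paths.append(path)
--
--     return filtered_paths
-- ===== SOURCE B (Python) =====
-- def filter_multiple_small_cave_paths(paths):
--     return [path for path in paths if _at_most_one_repeated_small(path)]
--
--
-- def _at_most_one_repeated_small(path):
--     seen = set()
--     repeated = set()
--     for cave in path:
--         if not any(ch.isupper() for ch in cave):
--             if cave in seen:
--                 repeated.add(cave)
--                 if len(repeated) > 1:
--                     return False
--             else:
--                 seen.add(cave)
--     return True
-- ===== Notes on version B (the rewrite author's own statement) =====
-- stated objective: simpler
-- what changed: Instead of building a full count dictionary per path and then counting values > 1, B keeps the path via a predicate doing one pass with two sets (seen/repeated) that early-exits as soon as a second distinct repeated small cave appears, and builds the result with a comprehension.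
import Mathlib
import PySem

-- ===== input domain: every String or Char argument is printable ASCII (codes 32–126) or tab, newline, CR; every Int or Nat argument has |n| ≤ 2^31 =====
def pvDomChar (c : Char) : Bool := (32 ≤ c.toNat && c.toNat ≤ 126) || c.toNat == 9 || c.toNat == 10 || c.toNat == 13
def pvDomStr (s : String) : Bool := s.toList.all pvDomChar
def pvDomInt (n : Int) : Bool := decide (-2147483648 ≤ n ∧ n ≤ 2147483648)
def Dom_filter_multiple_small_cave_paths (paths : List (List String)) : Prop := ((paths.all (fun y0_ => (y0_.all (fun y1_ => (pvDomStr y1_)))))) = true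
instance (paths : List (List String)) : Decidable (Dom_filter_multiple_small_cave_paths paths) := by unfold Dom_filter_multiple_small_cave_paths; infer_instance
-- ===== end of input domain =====

-- B replaces A's per-path count dictionary + values>1 scan by a one-pass predicate with two
-- sets (seen / repeated, early exit) and a comprehension; objective: simpler.

-- ===== PORT A =====
-- 'for ch in cave: if ch.isupper(): return False' / 'return True'
def isSmallCaveLoop : List Char → Bool
  | [] => true
  | c :: cs => if PySem.Chars.isupper c then false else isSmallCaveLoop cs

def is_small_cave (cave : String) : Bool := isSmallCaveLoop cave.toList

def filter_multiple_small_cave_paths (paths : List (List String)) : List (List String) :=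
  paths.foldl (fun filtered_paths path =>
    let small_cave_count_map : PySem.Dict String Int :=
      path.foldl (fun m cave =>
        if is_small_cave cave then m.insert cave (m.getD cave 0 + 1) else m) PySem.Dict.empty
    let has_multiple_small_caves :=
      decide (1 < ((small_cave_count_map.values.filter (fun sc => decide (1 < sc))).length : Int))
    if !has_multiple_small_caves then filtered_paths ++ [path] else filtered_paths) []

-- ===== PORT B =====
-- 'not any(ch.isupper() for ch in cave)'
def isSmallAlt (cave : String) : Bool := !(cave.toList.any PySem.Chars.isupper)

-- the for-loop of _at_most_one_repeated_small, state = (seen, repeated), early 'return False'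
def atMostOneRepeatedSmall : List String → PySem.Set String → PySem.Set String → Bool
  | [], _, _ => true
  | cave :: rest, seen, repeated =>
    if isSmallAlt cave then
      if PySem.Set.contains seen cave then
        let repeated' := PySem.Set.add repeated cave
        if 1 < repeated'.length then false
        else atMostOneRepeatedSmall rest seen repeated'
      else atMostOneRepeatedSmall rest (PySem.Set.add seen cave) repeated
    else atMostOneRepeatedSmall rest seen repeated

def filter_multiple_small_cave_paths_alt (paths : List (List String)) : List (List String) :=
  paths.filter (fun path => atMostOneRepeatedSmall path PySem.Set.empty PySem.Set.empty)

-- ===== PRECONDITION & SPEC =====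
def Spec_filter_multiple_small_cave_paths (paths : List (List String)) (out : List (List String)) : Prop := out = filter_multiple_small_cave_paths_alt paths
instance (paths : List (List String)) (out : List (List String)) : Decidable (Spec_filter_multiple_small_cave_paths paths out) := by unfold Spec_filter_multiple_small_cave_paths; infer_instance

-- ===== CLAIM (what is proved, stated in full; the proofs are below) =====
def Claim_equal_filter_multiple_small_cave_paths : Prop := ∀ (paths : List (List String)), Dom_filter_multiple_small_cave_paths paths → Spec_filter_multiple_small_cave_paths paths (filter_multiple_small_cave_paths paths)

-- ===== LEMMAS AND PROOFS =====

-- number of distinct caves occurring more than once in t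
def repCard (t : List String) : Nat := (t.toFinset.filter (fun k => 1 < t.count k)).card

theorem isSmallLoop_eq (l : List Char) : isSmallCaveLoop l = !(l.any PySem.Chars.isupper) := by
  induction l with
  | nil => rfl
  | cons c cs ih => cases h : PySem.Chars.isupper c <;> simp [isSmallCaveLoop, h, ih]

theorem isSmall_eq (cave : String) : is_small_cave cave = isSmallAlt cave := by
  simp [is_small_cave, isSmallAlt, isSmallLoop_eq]

theorem foldl_skip {α β : Type} (p : α → Bool) (g : β → α → β) (l : List α) (init : β) :
    l.foldl (fun d x => if p x then g d x else d) init = (l.filter p).foldl g init := by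
  induction l generalizing init with
  | nil => rfl
  | cons x xs ih =>
    by_cases h : p x = true <;> simp [h, ih]

theorem repCard_eq_length (t rep : List String) (hnd : rep.Nodup)
    (hmem : ∀ k, k ∈ rep ↔ (k ∈ t ∧ 1 < t.count k)) : rep.length = repCard t := by
  rw [← List.toFinset_card_of_nodup hnd]
  congr 1
  ext k
  simp [hmem k]

theorem repCard_mono (u v : List String) : repCard u ≤ repCard (u ++ v) := by
  apply Finset.card_le_card
  intro k hk
  simp only [Finset.mem_filter, List.mem_toFinset] at *
  constructor
  · simp [hk.1]
  · have := hk.2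
    rw [List.count_append]
    omega

theorem main_inv (l : List String) : ∀ (t : List String) (seen rep : PySem.Set String),
    (∀ k, PySem.Set.contains seen k = true ↔ k ∈ t) →
    rep.Nodup →
    (∀ k, k ∈ rep ↔ (k ∈ t ∧ 1 < t.count k)) →
    rep.length ≤ 1 →
    atMostOneRepeatedSmall l seen rep = decide (repCard (t ++ l.filter isSmallAlt) ≤ 1) := by
  induction l with
  | nil =>
    intro t seen rep hseen hnd hrep hlen
    have := repCard_eq_length t rep hnd hrep
    simp [atMostOneRepeatedSmall]
    omega
  | cons cave rest ih =>
    intro t seen rep hseen hnd hrep hlen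
    by_cases hs : isSmallAlt cave = true
    · have hfil : (cave :: rest).filter isSmallAlt = cave :: rest.filter isSmallAlt := by
        simp [hs]
      rw [hfil]
      have hassoc : t ++ cave :: rest.filter isSmallAlt = (t ++ [cave]) ++ rest.filter isSmallAlt := by
        simp
      by_cases hin : cave ∈ t
      · have hcont : PySem.Set.contains seen cave = true := (hseen cave).mpr hin
        have hnd' : (PySem.Set.add rep cave).Nodup := PySem.Set.nodup_add rep cave hnd
        have hrep' : ∀ k, k ∈ PySem.Set.add rep cave ↔ (k ∈ t ++ [cave] ∧ 1 < (t ++ [cave]).count k) := by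
          intro k
          rw [PySem.Set.mem_add]
          by_cases hk : k = cave
          · subst hk
            have : 0 < t.count k := List.count_pos_iff.mpr hin
            simp [List.count_append]
            omega
          · simp [hrep k, List.mem_append, List.count_append, hk]
            intro _
            have h0 : List.count k [cave] = 0 := by
              simp [List.count_cons, List.count_nil]
              exact fun h => hk h.symm
            rw [h0]
            simp
        have hlenrep : (PySem.Set.add rep cave).length = repCard (t ++ [cave]) :=
          repCard_eq_length _ _ hnd' hrep'
        simp only [atMostOneRepeatedSmall, hs, hcont, if_true]
        by_cases hbig : 1 < (PySem.Set.add rep cave).length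
        · rw [if_pos hbig]
          have hmono := repCard_mono (t ++ [cave]) (rest.filter isSmallAlt)
          have hgt : ¬ (repCard (t ++ cave :: rest.filter isSmallAlt) ≤ 1) := by
            rw [hassoc]; omega
          simp [hgt]
        · rw [if_neg hbig]
          rw [hassoc]
          apply ih (t ++ [cave]) seen (PySem.Set.add rep cave)
          · intro k
            rw [hseen k]
            constructor
            · intro h; simp [h]
            · intro h
              rcases List.mem_append.mp h with h | h
              · exact h
              · simpa [List.mem_singleton.mp h]
          · exact hnd'
          · exact hrep'
          · omega
      · have hcont : PySem.Set.contains seen cave = false := by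
          cases h : PySem.Set.contains seen cave
          · rfl
          · exact absurd ((hseen cave).mp h) hin
        simp only [atMostOneRepeatedSmall, hs, hcont, if_true, Bool.false_eq_true, if_false]
        rw [hassoc]
        apply ih (t ++ [cave]) (PySem.Set.add seen cave) rep
        · intro k
          rw [PySem.Set.contains_iff, PySem.Set.mem_add, List.mem_append, List.mem_singleton,
            ← PySem.Set.contains_iff, hseen k]
        · exact hnd
        · intro k
          have hc0 : t.count cave = 0 := List.count_eq_zero.mpr hin
          by_cases hk : k = cave
          · subst hk
            constructor
            · intro h
              exact absurd ((hrep k).mp h).1 hin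
            · intro h
              simp [List.count_append, hc0] at h
          · rw [hrep k]
            simp only [List.mem_append, List.mem_singleton, List.count_append, hk, or_false]
            have h0 : List.count k [cave] = 0 := by
              simp [List.count_cons, List.count_nil]
              exact fun h => hk h.symm
            rw [h0]
            simp
        · exact hlen
    · simp only [atMostOneRepeatedSmall]
      rw [if_neg hs]
      rw [List.filter_cons_of_neg (by simpa using hs)]
      exact ih t seen rep hseen hnd hrep hlen

theorem countMap_eq (path : List String) :
    ((path.foldl (fun (m : PySem.Dict String Int) cave =>
        if is_small_cave cave then m.insert cave (m.getD cave 0 + 1) else m)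
      PySem.Dict.empty).values.filter (fun sc => decide (1 < sc))).length
    = repCard (path.filter isSmallAlt) := by
  have hfe : is_small_cave = isSmallAlt := funext isSmall_eq
  rw [hfe, foldl_skip]
  set s := path.filter isSmallAlt with hsdef
  rw [PySem.Dict.foldl_insert_getD_add_one_eq_counter]
  have hvals : (PySem.Dict.counter s).values
      = (PySem.Set.ofList s).map (fun k => ((s.count k : Int))) := by
    show ((PySem.Dict.counter s).items.map (·.2)) = _
    rw [PySem.Dict.items_counter]
    simp
  rw [hvals, List.filter_map, List.length_map]
  have hpred : ((fun sc => decide ((1:Int) < sc)) ∘ (fun k => ((s.count k : Int))))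
      = fun k => decide (1 < s.count k) := by
    funext k
    simp
  rw [hpred]
  have hnd : (PySem.Set.ofList s).Nodup := PySem.Set.nodup_ofList s
  rw [← List.toFinset_card_of_nodup (hnd.filter _)]
  unfold repCard
  congr 1
  ext k
  simp [PySem.Set.mem_ofList]

-- ===== VERDICT (by name: the statement is the Claim_ definition above) =====
theorem filter_multiple_small_cave_paths_spec : Claim_equal_filter_multiple_small_cave_paths := by
  intro paths _
  unfold Spec_filter_multiple_small_cave_paths
  unfold filter_multiple_small_cave_paths filter_multiple_small_cave_paths_alt
  rw [PySem.List.foldl_append_if_eq_filter]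
  rw [List.nil_append]
  apply List.filter_congr
  intro path _
  have hA := countMap_eq path
  have hB := main_inv path [] PySem.Set.empty PySem.Set.empty
    (by intro k; simp [PySem.Set.empty])
    (List.nodup_nil) (by intro k; simp) (by simp [PySem.Set.empty])
  simp only [List.nil_append] at hB
  rw [hB]
  simp only [hA]
  rcases Nat.lt_or_ge 1 (repCard (path.filter isSmallAlt)) with h | h
  · simp [h]
  · simp [h]
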